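-- pv_equiv track=rewrite | github.com/dingchaofan/AlgorithmSolution | InterviewSolution/test.py | bestNum
-- ===== SOURCE A (Python) =====
-- def bestNum(studentnum,subjectnum,score):
--     bestnum = 0
--     bestStudents = []
--     for i in range(subjectnum):
--         thisSubScore = [int(tem[i]) for tem in score]
--         bestScore = max(thisSubScore)
--         for stuNum in range(len(thisSubScore)):
--             if thisSubScore[stuNum] == bestScore:
--                 bestStudent = stuNum
--                 if bestStudent in bestStudents:
--                     pass
--                 else:
--                     bestStudents.append(bestStudent)
--
--     return len(bestStudents)
-- ===== SOURCE B (Python) =====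
-- def bestNum(studentnum, subjectnum, score):
--     if subjectnum <= 0:
--         return 0
--     table = [[int(row[i]) for i in range(subjectnum)] for row in score]
--     best = [max(row[i] for row in table) for i in range(subjectnum)]
--     return sum(1 for row in table if any(row[i] == best[i] for i in range(subjectnum)))
-- ===== Notes on version B (the rewrite author's own statement) =====
-- stated objective: alternative
-- what changed: B inverts the traversal: it parses the grid once, precomputes the per-subject maxima, and counts students in a single per-student scan with any(), instead of A's per-subject inner loops that accumulate a deduplicated list of best student indices.
import Mathlib
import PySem

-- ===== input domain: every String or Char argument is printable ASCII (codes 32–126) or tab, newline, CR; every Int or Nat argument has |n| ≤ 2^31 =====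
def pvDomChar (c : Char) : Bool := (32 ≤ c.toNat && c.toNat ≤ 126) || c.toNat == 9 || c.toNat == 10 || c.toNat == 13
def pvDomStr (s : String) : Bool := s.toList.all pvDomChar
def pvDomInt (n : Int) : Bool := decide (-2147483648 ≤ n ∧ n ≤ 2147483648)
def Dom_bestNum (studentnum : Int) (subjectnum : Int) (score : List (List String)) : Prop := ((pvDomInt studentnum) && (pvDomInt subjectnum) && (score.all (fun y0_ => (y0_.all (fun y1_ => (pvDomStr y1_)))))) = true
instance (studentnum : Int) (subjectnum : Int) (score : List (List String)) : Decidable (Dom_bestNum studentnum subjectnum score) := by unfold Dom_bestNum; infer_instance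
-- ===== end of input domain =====

-- B counts best students by a precomputed per-subject maxima table and one per-student scan,
-- instead of A's per-subject dedup-list accumulation; same cost, different decomposition.

-- ===== PORT A =====
-- literal port of A: outer loop over subjects, column comprehension, max, inner loop
-- collecting distinct best student indices ('bestnum = 0' is dead in A and dropped).
def bestNum (studentnum : Int) (subjectnum : Int) (score : List (List String)) : Int :=
  let bestStudents := (PySem.List.pyRange 0 subjectnum 1).foldl (fun (bs : List Int) i =>
    let thisSubScore := score.map (fun tem => (PySem.Int.ofStr? (PySem.List.pyGetD tem i "")).getD 0)
    let bestScore := match thisSubScore with | [] => 0 | x :: t => t.foldl max x  -- max(xs); [] excluded by Pre_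
    (PySem.List.pyRange 0 (thisSubScore.length : Int) 1).foldl (fun bs2 stuNum =>
      if PySem.List.pyGetD thisSubScore stuNum 0 = bestScore then
        (if stuNum ∈ bs2 then bs2 else bs2 ++ [stuNum])
      else bs2) bs) []
  (bestStudents.length : Int)

-- ===== PORT B =====
def bestNum_alt (studentnum : Int) (subjectnum : Int) (score : List (List String)) : Int :=
  if subjectnum ≤ 0 then 0
  else
    let rng := PySem.List.pyRange 0 subjectnum 1
    let table := score.map (fun row => rng.map (fun i => (PySem.Int.ofStr? (PySem.List.pyGetD row i "")).getD 0))
    let best := rng.map (fun i =>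
      match table.map (fun row => PySem.List.pyGetD row i 0) with
      | [] => 0  -- max over empty generator; [] excluded by Pre_
      | x :: t => t.foldl max x)
    ((table.countP (fun row => rng.any (fun i => PySem.List.pyGetD row i 0 == PySem.List.pyGetD best i 0))) : Int)

-- ===== PRECONDITION & SPEC =====
-- Pre_ excludes exactly the inputs where the Python A raises: with subjectnum > 0 it needs a
-- nonempty score (else ValueError from max([])), every row long enough (else IndexError), and
-- every used cell parsable by int() (else ValueError).
def Pre_bestNum (studentnum : Int) (subjectnum : Int) (score : List (List String)) : Prop :=
  subjectnum ≤ 0 ∨ (score ≠ [] ∧ ∀ row ∈ score, subjectnum ≤ (row.length : Int) ∧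
    ∀ i ∈ PySem.List.pyRange 0 subjectnum 1, (PySem.Int.ofStr? (PySem.List.pyGetD row i "")).isSome)
instance (studentnum : Int) (subjectnum : Int) (score : List (List String)) : Decidable (Pre_bestNum studentnum subjectnum score) := by unfold Pre_bestNum; infer_instance
def pvWitness_bestNum : Int × Int × List (List String) := (2, 2, [["3", "1"], ["5", "1"]])
def Spec_bestNum (studentnum : Int) (subjectnum : Int) (score : List (List String)) (out : Int) : Prop := out = bestNum_alt studentnum subjectnum score
instance (studentnum : Int) (subjectnum : Int) (score : List (List String)) (out : Int) : Decidable (Spec_bestNum studentnum subjectnum score out) := by unfold Spec_bestNum; infer_instance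

-- ===== CLAIM (what is proved, stated in full; the proofs are below) =====
def Claim_equal_bestNum : Prop := ∀ (studentnum : Int) (subjectnum : Int) (score : List (List String)), Dom_bestNum studentnum subjectnum score → Pre_bestNum studentnum subjectnum score → Spec_bestNum studentnum subjectnum score (bestNum studentnum subjectnum score)

-- ===== LEMMAS AND PROOFS =====

-- cell value int(score[s][i]) as both ports compute it
def pvVal (row : List String) (i : Int) : Int := (PySem.Int.ofStr? (PySem.List.pyGetD row i "")).getD 0
def pvCol (score : List (List String)) (i : Int) : List Int := score.map (fun r => pvVal r i)
def pvMax (score : List (List String)) (i : Int) : Int :=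
  match pvCol score i with | [] => 0 | x :: t => t.foldl max x
def pvHit (score : List (List String)) (n : Int) (s : Int) : Bool :=
  (PySem.List.pyRange 0 n 1).any (fun i => PySem.List.pyGetD (pvCol score i) s 0 == pvMax score i)

-- the common normal form both ports equal
def pvN (score : List (List String)) (n : Int) : Nat :=
  ((PySem.List.pyRange 0 (score.length : Int) 1).filter (pvHit score n)).length

-- A's inner-loop body
def pvStep (score : List (List String)) (i : Int) (bs2 : List Int) (stuNum : Int) : List Int :=
  if PySem.List.pyGetD (pvCol score i) stuNum 0 = pvMax score i then
    (if stuNum ∈ bs2 then bs2 else bs2 ++ [stuNum])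
  else bs2

theorem pvStep_nodup (score : List (List String)) (i : Int) (bs : List Int) (s : Int)
    (h : bs.Nodup) : (pvStep score i bs s).Nodup := by
  unfold pvStep
  split_ifs with h1 h2
  · exact h
  · rw [List.nodup_append]
    refine ⟨h, List.nodup_singleton s, ?_⟩
    intro a ha b hb
    simp only [List.mem_singleton] at hb
    subst hb
    exact fun he => h2 (he ▸ ha)
  · exact h

theorem pvStep_mem (score : List (List String)) (i : Int) (bs : List Int) (s x : Int) :
    x ∈ pvStep score i bs s ↔ x ∈ bs ∨ (x = s ∧ PySem.List.pyGetD (pvCol score i) s 0 = pvMax score i) := by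
  unfold pvStep
  split_ifs with h1 h2
  · constructor
    · exact fun hx => Or.inl hx
    · rintro (hx | ⟨rfl, _⟩)
      · exact hx
      · exact h2
  · simp only [List.mem_append, List.mem_singleton]
    tauto
  · constructor
    · exact fun hx => Or.inl hx
    · rintro (hx | ⟨rfl, hp⟩)
      · exact hx
      · exact absurd hp h1

theorem pvInner (score : List (List String)) (i : Int) : ∀ (k : Nat) (a : Int) (bs : List Int),
    bs.Nodup →
    ((PySem.List.pyRange a (a + k) 1).foldl (pvStep score i) bs).Nodup ∧
    (∀ x, x ∈ (PySem.List.pyRange a (a + k) 1).foldl (pvStep score i) bs ↔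
      x ∈ bs ∨ (a ≤ x ∧ x < a + k ∧ PySem.List.pyGetD (pvCol score i) x 0 = pvMax score i)) := by
  intro k
  induction k with
  | zero =>
    intro a bs hbs
    rw [show a + ((0 : Nat) : Int) = a by simp, PySem.List.pyRange_one_eq_nil (le_refl a)]
    refine ⟨hbs, fun x => ?_⟩
    simp only [List.foldl_nil]
    constructor
    · exact Or.inl
    · rintro (hx | ⟨h1, h2, _⟩)
      · exact hx
      · omega
  | succ k ih =>
    intro a bs hbs
    rw [PySem.List.pyRange_one_cons (by omega)]
    have h1 : (a + 1) + (k : Int) = a + ((k : Nat) + 1 : Nat) := by push_cast; ring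
    simp only [List.foldl_cons]
    have hrec := ih (a + 1) (pvStep score i bs a) (pvStep_nodup score i bs a hbs)
    rw [h1] at hrec
    refine ⟨hrec.1, fun x => ?_⟩
    rw [hrec.2 x, pvStep_mem]
    constructor
    · rintro ((hx | ⟨rfl, hp⟩) | ⟨h2, h3, hp⟩)
      · tauto
      · exact Or.inr ⟨le_refl _, by push_cast; omega, hp⟩
      · exact Or.inr ⟨by omega, h3, hp⟩
    · rintro (hx | ⟨h2, h3, hp⟩)
      · tauto
      · by_cases hxa : x = a
        · subst hxa; tauto
        · exact Or.inr ⟨by omega, h3, hp⟩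

theorem pvOuter (score : List (List String)) : ∀ (I : List Int) (bs : List Int), bs.Nodup →
    (I.foldl (fun bs i => (PySem.List.pyRange 0 ((pvCol score i).length : Int) 1).foldl (pvStep score i) bs) bs).Nodup ∧
    (∀ x, x ∈ I.foldl (fun bs i => (PySem.List.pyRange 0 ((pvCol score i).length : Int) 1).foldl (pvStep score i) bs) bs ↔
      x ∈ bs ∨ ∃ i ∈ I, (0 ≤ x ∧ x < (score.length : Int) ∧ PySem.List.pyGetD (pvCol score i) x 0 = pvMax score i)) := by
  intro I
  induction I with
  | nil => intro bs hbs; simpa using hbs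
  | cons i I ih =>
    intro bs hbs
    simp only [List.foldl_cons]
    have hlen : ((pvCol score i).length : Int) = 0 + ((score.length : Nat) : Int) := by
      simp [pvCol]
    have hinner := pvInner score i score.length 0 bs hbs
    rw [← hlen] at hinner
    have hrest := ih _ hinner.1
    refine ⟨hrest.1, fun x => ?_⟩
    rw [hrest.2 x, hinner.2 x]
    constructor
    · rintro ((hx | ⟨h1, h2, hp⟩) | ⟨j, hj, hb⟩)
      · tauto
      · exact Or.inr ⟨i, by simp, h1, by rw [hlen] at h2; omega, hp⟩
      · exact Or.inr ⟨j, by simp [hj], hb⟩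
    · rintro (hx | ⟨j, hj, h1, h2, hp⟩)
      · tauto
      · rcases List.mem_cons.mp hj with rfl | hj
        · exact Or.inl (Or.inr ⟨h1, by rw [hlen]; omega, hp⟩)
        · exact Or.inr ⟨j, hj, h1, h2, hp⟩

theorem bestNum_eq_N : ∀ (stu n : Int) (score : List (List String)),
    bestNum stu n score = (pvN score n : Int) := by
  intro stu n score
  have hdef : bestNum stu n score =
      (((PySem.List.pyRange 0 n 1).foldl
        (fun bs i => (PySem.List.pyRange 0 ((pvCol score i).length : Int) 1).foldl (pvStep score i) bs) []).length : Int) := rfl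
  rw [hdef]
  have h := pvOuter score (PySem.List.pyRange 0 n 1) [] List.nodup_nil
  have hL : ((PySem.List.pyRange 0 (score.length : Int) 1).filter (pvHit score n)).Nodup :=
    (PySem.List.nodup_pyRange_one 0 (score.length : Int)).filter _
  have hmem : ∀ x, x ∈ (PySem.List.pyRange 0 n 1).foldl
      (fun bs i => (PySem.List.pyRange 0 ((pvCol score i).length : Int) 1).foldl (pvStep score i) bs) [] ↔
      x ∈ (PySem.List.pyRange 0 (score.length : Int) 1).filter (pvHit score n) := by
    intro x
    rw [h.2 x]
    simp only [List.mem_filter, PySem.List.mem_pyRange_one, pvHit, List.any_eq_true, beq_iff_eq,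
      List.not_mem_nil, false_or]
    constructor
    · rintro ⟨i, hi, h1, h2, hp⟩; exact ⟨⟨h1, h2⟩, i, hi, hp⟩
    · rintro ⟨⟨h1, h2⟩, i, hi, hp⟩; exact ⟨i, hi, h1, h2, hp⟩
  have hperm := (List.perm_ext_iff_of_nodup h.1 hL).mpr hmem
  rw [pvN, hperm.length_eq]

theorem pvAny_congr (l : List Int) (p q : Int → Bool) (h : ∀ a ∈ l, p a = q a) :
    l.any p = l.any q := by
  induction l with
  | nil => rfl
  | cons x l ih =>
    simp only [List.any_cons, h x (by simp), ih (fun a ha => h a (by simp [ha]))]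

theorem pvCountP_range_getD {α : Type} (p : α → Bool) (d : α) : ∀ (xs : List α),
    (List.range xs.length).countP (fun k => p (xs.getD k d)) = xs.countP p := by
  intro xs
  induction xs with
  | nil => simp
  | cons x xs ih =>
    rw [List.length_cons, List.range_succ_eq_map, List.countP_cons, List.countP_map,
      List.countP_cons]
    simp only [Function.comp_def, List.getD_cons_succ, List.getD_cons_zero]
    rw [ih]

theorem pvCountP_pyRange {α : Type} (p : α → Bool) (d : α) (xs : List α) :
    ((PySem.List.pyRange 0 (xs.length : Int) 1).filter (fun s => p (PySem.List.pyGetD xs s d))).length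
      = xs.countP p := by
  rw [PySem.List.pyRange_one]
  have h0 : ((xs.length : Int) - 0).toNat = xs.length := by omega
  rw [h0, List.filter_map, List.length_map, ← List.countP_eq_length_filter]
  have h1 : ∀ k ∈ List.range xs.length,
      ((fun s => p (PySem.List.pyGetD xs s d)) ∘ (fun k : Nat => (0 : Int) + k)) k
      = (fun k => p (xs.getD k d)) k := by
    intro k _
    simp [Function.comp, PySem.List.pyGetD_natCast]
  rw [List.countP_congr (fun a ha => by rw [h1 a ha])]
  exact pvCountP_range_getD p d xs

theorem bestNum_alt_eq_N : ∀ (stu n : Int) (score : List (List String)),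
    bestNum_alt stu n score = (pvN score n : Int) := by
  intro stu n score
  by_cases hn : n ≤ 0
  · simp only [bestNum_alt, if_pos hn]
    have h : pvN score n = 0 := by
      simp [pvN, pvHit, PySem.List.pyRange_one_eq_nil hn, List.filter_eq_nil_iff]
    rw [h]; rfl
  · simp only [bestNum_alt, if_neg hn]
    show (((score.map (fun row => (PySem.List.pyRange 0 n 1).map (fun i => pvVal row i))).countP
        (fun row => (PySem.List.pyRange 0 n 1).any (fun i => PySem.List.pyGetD row i 0 ==
          PySem.List.pyGetD ((PySem.List.pyRange 0 n 1).map (fun i =>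
            match (score.map (fun row => (PySem.List.pyRange 0 n 1).map (fun i => pvVal row i))).map
                (fun row => PySem.List.pyGetD row i 0) with
            | [] => 0
            | x :: t => t.foldl max x)) i 0))) : Int) = (pvN score n : Int)
    have hbest : (PySem.List.pyRange 0 n 1).map (fun i =>
        match (score.map (fun row => (PySem.List.pyRange 0 n 1).map (fun i => pvVal row i))).map
            (fun row => PySem.List.pyGetD row i 0) with
        | [] => 0
        | x :: t => t.foldl max x) = (PySem.List.pyRange 0 n 1).map (fun i => pvMax score i) := by
      apply List.map_congr_left
      intro i hi
      obtain ⟨hi0, hi1⟩ := PySem.List.mem_pyRange_one.mp hi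
      have hcol : (score.map (fun row => (PySem.List.pyRange 0 n 1).map (fun i => pvVal row i))).map
          (fun row => PySem.List.pyGetD row i 0) = pvCol score i := by
        rw [List.map_map]
        apply List.map_congr_left
        intro r _
        simp only [Function.comp_def]
        exact PySem.List.pyGetD_map_pyRange_of_nonneg _ _ _ _ hi0 hi1
      rw [hcol]
      rfl
    rw [hbest, List.countP_map]
    have hrow : ∀ row ∈ score,
        ((fun row => (PySem.List.pyRange 0 n 1).any (fun i => PySem.List.pyGetD row i 0 ==
            PySem.List.pyGetD ((PySem.List.pyRange 0 n 1).map (fun i => pvMax score i)) i 0)) ∘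
          (fun row => (PySem.List.pyRange 0 n 1).map (fun i => pvVal row i))) row
        = (fun row => (PySem.List.pyRange 0 n 1).any (fun i => pvVal row i == pvMax score i)) row := by
      intro row _
      simp only [Function.comp_def]
      apply pvAny_congr
      intro i hi
      obtain ⟨hi0, hi1⟩ := PySem.List.mem_pyRange_one.mp hi
      rw [PySem.List.pyGetD_map_pyRange_of_nonneg _ _ _ _ hi0 hi1,
        PySem.List.pyGetD_map_pyRange_of_nonneg _ _ _ _ hi0 hi1]
    rw [List.countP_congr (fun a ha => by rw [hrow a ha])]
    rw [← pvCountP_pyRange (fun row => (PySem.List.pyRange 0 n 1).any (fun i => pvVal row i == pvMax score i)) ([] : List String) score]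
    have hfc : ∀ s ∈ PySem.List.pyRange 0 (score.length : Int) 1,
        (fun s => (PySem.List.pyRange 0 n 1).any (fun i => pvVal (PySem.List.pyGetD score s []) i == pvMax score i)) s
        = pvHit score n s := by
      intro s hs
      obtain ⟨hs0, hs1⟩ := PySem.List.mem_pyRange_one.mp hs
      unfold pvHit
      apply pvAny_congr
      intro i _
      have hv : PySem.List.pyGetD (pvCol score i) s 0 = pvVal (PySem.List.pyGetD score s []) i := by
        rw [PySem.List.pyGetD_eq_getElem (pvCol score i) 0 hs0 (by simpa [pvCol] using hs1),
          PySem.List.pyGetD_eq_getElem score ([] : List String) hs0 hs1]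
        simp [pvCol]
      rw [hv]
    rw [pvN, List.filter_congr hfc]

-- ===== VERDICT (by name: the statement is the Claim_ definition above) =====
theorem bestNum_spec : Claim_equal_bestNum := by
  intro stu n score _ _
  unfold Spec_bestNum
  rw [bestNum_eq_N, bestNum_alt_eq_N]
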